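-- pv_equiv track=rewrite | github.com/vinodjanagal/fastapi-ai-video-generator | app/audio_generator.py | _insert_light_commas
-- ===== SOURCE A (Python) =====
-- def _insert_light_commas(text: str, every_n_words: int = 8) -> str:
--     words = text.strip().split()
--     if len(words) <= every_n_words:
--         return text.strip()
--     out = []
--     for i, w in enumerate(words):
--         out.append(w)
--         if (i + 1) % every_n_words == 0 and i + 1 < len(words):
--             if not out[-1].endswith((".", "!", "?", ",")):
--                 out[-1] = out[-1] + ","
--     return " ".join(out)
-- ===== SOURCE B (Python) =====
-- def _insert_light_commas(text: str, every_n_words: int = 8) -> str: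
--     words = text.strip().split()
--     if len(words) <= every_n_words:
--         return text.strip()
--
--     def go(ws):
--         if len(ws) <= every_n_words:
--             return " ".join(ws)
--         head, rest = ws[:every_n_words], ws[every_n_words:]
--         sep = " " if head[-1].endswith((".", "!", "?", ",")) else ", "
--         return " ".join(head) + sep + go(rest)
--
--     return go(words)
-- ===== Notes on version B (the rewrite author's own statement) =====
-- stated objective: alternative
-- what changed: Replaced A's per-word enumerate loop (modulo test on every index, comma patched onto out[-1], one final join) by a recursive chunker that peels off every_n_words words at a time and concatenates the joined chunks with a comma-space or plain-space separator.
-- outside the precondition, e.g. on _insert_light_commas('a b c', -2): A returns 'a b, c', B raises IndexError; on _insert_light_commas('a b c', 0): A raises ZeroDivisionError, B raises IndexError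
import Mathlib
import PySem

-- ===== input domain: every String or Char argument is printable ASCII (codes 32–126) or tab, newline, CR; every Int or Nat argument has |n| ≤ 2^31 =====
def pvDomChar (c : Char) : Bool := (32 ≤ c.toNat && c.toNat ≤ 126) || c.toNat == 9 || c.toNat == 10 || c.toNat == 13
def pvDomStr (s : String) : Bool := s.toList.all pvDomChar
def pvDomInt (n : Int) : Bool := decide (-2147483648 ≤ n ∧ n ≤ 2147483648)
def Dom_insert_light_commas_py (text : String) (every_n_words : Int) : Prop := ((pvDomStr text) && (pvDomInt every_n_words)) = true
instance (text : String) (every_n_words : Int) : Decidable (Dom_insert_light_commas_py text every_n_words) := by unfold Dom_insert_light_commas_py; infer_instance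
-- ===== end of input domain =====

-- B replaces A's per-word enumerate loop (modulo test on every index, comma patched onto
-- out[-1], one final join) by a recursive chunker that peels off every_n_words words at a
-- time and concatenates the joined chunks with a comma-space or plain-space separator:
-- a different decomposition of the same task ('alternative').

-- w.endswith((".", "!", "?", ",")) — library-level test both Pythons write verbatim
def pvEndsPunct (w : String) : Bool :=
  PySem.Str.endswith w "." || PySem.Str.endswith w "!" || PySem.Str.endswith w "?" ||
    PySem.Str.endswith w ","

-- ===== PORT A =====
def insert_light_commas_py (text : String) (every_n_words : Int) : String :=
  let words := PySem.Str.split₀ (PySem.Str.strip text)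
  if (words.length : Int) ≤ every_n_words then
    PySem.Str.strip text
  else
    let out := (PySem.List.enumerate words).foldl
      (fun out p =>
        let out := out ++ [p.2]
        if PySem.Int.mod (p.1 + 1) every_n_words = 0 ∧ p.1 + 1 < (words.length : Int) then
          -- out[-1] = out[-1] + "," : out is nonempty here, so this is exact
          if pvEndsPunct out.getLast! = false then out.dropLast ++ [out.getLast! ++ ","]
          else out
        else out) []
    PySem.Str.join " " out

-- ===== PORT B =====
-- the inner recursive helper 'go'; the fuel argument only makes the recursion structural
-- (for every_n_words > 0 it is never exhausted; the Python recursion needs no fuel)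
def pvGoB (n : Int) : Nat → List String → String
  | 0, _ => ""
  | fuel + 1, ws =>
    if (ws.length : Int) ≤ n then PySem.Str.join " " ws
    else
      let head := PySem.List.slice ws none (some n)
      let rest := PySem.List.slice ws (some n) none
      let sep := if pvEndsPunct head.getLast! then " " else ", "
      PySem.Str.join " " head ++ sep ++ pvGoB n fuel rest

def insert_light_commas_py_alt (text : String) (every_n_words : Int) : String :=
  let words := PySem.Str.split₀ (PySem.Str.strip text)
  if (words.length : Int) ≤ every_n_words then PySem.Str.strip text
  else pvGoB every_n_words (words.length + 1) words

-- ===== PRECONDITION & SPEC =====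
-- Pre_ restricts to the function's natural domain, a positive words-per-comma count:
-- at every_n_words = 0 A raises ZeroDivisionError, for a negative count A returns a
-- per-modulo comma placement while B's chunk recursion raises IndexError.
def Pre_insert_light_commas_py (text : String) (every_n_words : Int) : Prop :=
  0 < every_n_words
instance (text : String) (every_n_words : Int) : Decidable (Pre_insert_light_commas_py text every_n_words) := by unfold Pre_insert_light_commas_py; infer_instance

def pvWitness_insert_light_commas_py : String × Int := ("one two three", 2)

def Spec_insert_light_commas_py (text : String) (every_n_words : Int) (out : String) : Prop := out = insert_light_commas_py_alt text every_n_words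
instance (text : String) (every_n_words : Int) (out : String) : Decidable (Spec_insert_light_commas_py text every_n_words out) := by unfold Spec_insert_light_commas_py; infer_instance

-- ===== CLAIM (what is proved, stated in full; the proofs are below) =====
def Claim_equal_insert_light_commas_py : Prop := ∀ (text : String) (every_n_words : Int), Dom_insert_light_commas_py text every_n_words → Pre_insert_light_commas_py text every_n_words → Spec_insert_light_commas_py text every_n_words (insert_light_commas_py text every_n_words)

-- ===== LEMMAS AND PROOFS =====

-- what A does to the word at absolute index p.1
def pvG (len m : Nat) (p : Int × String) : String :=
  if PySem.Int.mod (p.1 + 1) (m : Int) = 0 ∧ p.1 + 1 < (len : Int) then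
    (if pvEndsPunct p.2 = false then p.2 ++ "," else p.2)
  else p.2

theorem pvGetLast!_concat (l : List String) (w : String) : (l ++ [w]).getLast! = w := by
  induction l with
  | nil => rfl
  | cons x xs ih =>
      cases xs with
      | nil => rfl
      | cons y ys => simpa [List.getLast!] using ih

theorem pvGetLast!_eq (l : List String) (h : l ≠ []) : l.getLast! = l.getLast h := by
  rcases List.eq_nil_or_concat l with rfl | ⟨l', a, rfl⟩
  · exact absurd rfl h
  · simp only [List.concat_eq_append]
    rw [pvGetLast!_concat]
    simp

theorem pvFoldA (len m : Nat) (l : List (Int × String)) (acc : List String) :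
    l.foldl
      (fun out p =>
        let out := out ++ [p.2]
        if PySem.Int.mod (p.1 + 1) (m : Int) = 0 ∧ p.1 + 1 < (len : Int) then
          if pvEndsPunct out.getLast! = false then out.dropLast ++ [out.getLast! ++ ","]
          else out
        else out) acc
    = acc ++ l.map (pvG len m) := by
  induction l generalizing acc with
  | nil => simp
  | cons p ps ih =>
      simp only [List.foldl_cons, List.map_cons, ih]
      by_cases h : PySem.Int.mod (p.1 + 1) (m : Int) = 0 ∧ p.1 + 1 < (len : Int)
      · simp only [pvG, if_pos h, pvGetLast!_concat, List.dropLast_concat]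
        by_cases he : pvEndsPunct p.2 = false <;> simp [he]
      · simp [pvG, h]

theorem pvDvdWindow (m j k : Nat) (hj : m ∣ j) (hk : k + 1 ≤ m) :
    (m ∣ (j + k + 1)) ↔ k + 1 = m := by
  constructor
  · intro h
    have h2 : m ∣ (j + k + 1 - j) := Nat.dvd_sub h hj
    have h3 : j + k + 1 - j = k + 1 := by omega
    rw [h3] at h2
    exact Nat.le_antisymm hk (Nat.le_of_dvd (by omega) h2)
  · intro h
    have : j + k + 1 = j + m := by omega
    rw [this]
    exact Nat.dvd_add hj dvd_rfl

theorem pvCondConv (m j k : Nat) :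
    (PySem.Int.mod ((j : Int) + (k : Int) + 1) (m : Int) = 0) ↔ m ∣ (j + k + 1) := by
  rw [PySem.Int.mod_eq_zero_iff_dvd]
  have hc : ((j : Int) + (k : Int) + 1) = ((j + k + 1 : Nat) : Int) := by push_cast; ring
  rw [hc]
  exact Int.natCast_dvd_natCast

-- map pvG over an enumerated block in which A adds no comma
theorem pvMapG_id (len m : Nat) (c : List String) (j : Nat)
    (h : ∀ k, k < c.length →
        ¬ (PySem.Int.mod ((j : Int) + (k : Int) + 1) (m : Int) = 0 ∧
            (j : Int) + (k : Int) + 1 < (len : Int))) :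
    (PySem.List.enumerate c (j : Int)).map (pvG len m) = c := by
  have := List.map_congr_left (l := PySem.List.enumerate c (j : Int))
      (f := pvG len m) (g := fun p => p.2) ?_
  · rw [this, PySem.List.map_snd_enumerate]
  · intro p hp
    rcases (PySem.List.mem_enumerate_iff _ _ _).mp hp with ⟨k, hk, rfl⟩
    have hcond := h k hk
    simp only [pvG]
    rw [if_neg (by exact fun hc => hcond ⟨by linarith [hc.1], by linarith [hc.2]⟩)]

-- 'sep.join(x :: l)' for nonempty l, as character lists
theorem pvJoinCons (s x : List Char) (l : List (List Char)) (h : l ≠ []) :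
    PySem.Chars.join s (x :: l) = x ++ s ++ PySem.Chars.join s l := by
  cases l with
  | nil => exact absurd rfl h
  | cons y ys => rw [PySem.Chars.join_cons_cons]

-- join distributes over ++ of two nonempty lists of pieces
theorem pvJoinAppend (s : List Char) (l1 l2 : List (List Char)) (h1 : l1 ≠ []) (h2 : l2 ≠ []) :
    PySem.Chars.join s (l1 ++ l2) = PySem.Chars.join s l1 ++ s ++ PySem.Chars.join s l2 := by
  induction l1 with
  | nil => exact absurd rfl h1
  | cons x xs ih =>
      cases xs with
      | nil =>
          rw [List.singleton_append, pvJoinCons s x l2 h2, PySem.Chars.join_singleton]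
      | cons y ys =>
          rw [List.cons_append, pvJoinCons s x ((y :: ys) ++ l2) (by simp),
            ih (by simp), pvJoinCons s x (y :: ys) (by simp)]
          simp [List.append_assoc]

-- appending characters to the LAST piece appends them to the join
theorem pvJoinConcatSuffix (s : List Char) (X : List (List Char)) (a b : List Char) :
    PySem.Chars.join s (X ++ [a ++ b]) = PySem.Chars.join s (X ++ [a]) ++ b := by
  induction X with
  | nil => simp [PySem.Chars.join_singleton]
  | cons x xs ih =>
      rw [List.cons_append, List.cons_append, pvJoinCons s x (xs ++ [a ++ b]) (by simp),
        pvJoinCons s x (xs ++ [a]) (by simp), ih]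
      simp [List.append_assoc]

-- the heart: B's recursive chunking produces exactly the join of A's per-index map
theorem pvMain (ws : List String) (m : Nat) (hm : 0 < m) :
    ∀ (fuel j : Nat), ws.length - j < fuel → m ∣ j → j ≤ ws.length →
      pvGoB (m : Int) fuel (ws.drop j)
        = PySem.Str.join " "
            ((PySem.List.enumerate (ws.drop j) (j : Int)).map (pvG ws.length m)) := by
  intro fuel
  induction fuel with
  | zero => intro j h1 _ _; omega
  | succ fuel ih =>
      intro j h1 h2 h3
      rw [pvGoB]
      by_cases hbase : ((ws.drop j).length : Int) ≤ (m : Int)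
      · -- final (or only) chunk: A adds no comma in this window either
        rw [if_pos hbase]
        congr 1
        symm
        apply pvMapG_id
        intro k hk hc
        have hklen : k < ws.length - j := by simpa [List.length_drop] using hk
        have hle : ws.length - j ≤ m := by
          have := hbase
          simp only [List.length_drop] at this
          exact_mod_cast this
        have hdvd := (pvCondConv m j k).mp hc.1
        have := (pvDvdWindow m j k h2 (by omega)).mp hdvd
        have hlt : j + k + 1 < ws.length := by exact_mod_cast hc.2
        omega
      · rw [if_neg hbase]
        have hlen : m < ws.length - j := by
          have : ¬ ((ws.drop j).length ≤ m) := by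
            intro h; exact hbase (by simpa [List.length_drop] using Int.ofNat_le.mpr h)
          simp only [List.length_drop] at this
          omega
        have hhead : PySem.List.slice (ws.drop j) none (some (m : Int)) = (ws.drop j).take m :=
          PySem.List.slice_to_natCast _ _
        have hrest : PySem.List.slice (ws.drop j) (some (m : Int)) none = ws.drop (j + m) := by
          rw [PySem.List.slice_from_natCast, List.drop_drop, Nat.add_comm]
        set hd := (ws.drop j).take m with hhd
        have hlenhead : hd.length = m := by
          simp [hhd, List.length_take, List.length_drop]; omega
        have hne : hd ≠ [] := by
          intro h; rw [h] at hlenhead; simp at hlenhead; omega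
        have hdecomp : hd.dropLast ++ [hd.getLast hne] = hd := List.dropLast_append_getLast hne
        have hlen_dl : hd.dropLast.length = m - 1 := by simp [List.length_dropLast, hlenhead]
        have hsplit : ws.drop j = hd ++ ws.drop (j + m) := by
          rw [hhd]
          have : ws.drop (j + m) = (ws.drop j).drop m := by rw [List.drop_drop, Nat.add_comm]
          rw [this, List.take_append_drop]
        -- rewrite the recursive call with the induction hypothesis
        have hrec := ih (j + m) (by omega) (Nat.dvd_add h2 dvd_rfl) (by omega)
        simp only [hhead, hrest, hrec]
        -- the A-side map over the split window
        have hAmap : (PySem.List.enumerate (ws.drop j) (j : Int)).map (pvG ws.length m)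
            = hd.dropLast
              ++ [if pvEndsPunct (hd.getLast hne) = false then hd.getLast hne ++ ","
                  else hd.getLast hne]
              ++ (PySem.List.enumerate (ws.drop (j + m)) ((j : Int) + (m : Int))).map
                  (pvG ws.length m) := by
          conv_lhs => rw [hsplit, ← hdecomp, List.append_assoc]
          rw [PySem.List.enumerate_append, PySem.List.enumerate_append, List.map_append,
            List.map_append]
          have hid : (PySem.List.enumerate hd.dropLast (j : Int)).map (pvG ws.length m)
              = hd.dropLast := by
            apply pvMapG_id
            intro k hk hc
            have hkm1 : k < m - 1 := by rwa [hlen_dl] at hk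
            have hdvd := (pvCondConv m j k).mp hc.1
            have := (pvDvdWindow m j k h2 (by omega)).mp hdvd
            omega
          have hlast1 : (PySem.List.enumerate [hd.getLast hne]
                ((j : Int) + (hd.dropLast.length : Int))).map (pvG ws.length m)
              = [if pvEndsPunct (hd.getLast hne) = false then hd.getLast hne ++ ","
                  else hd.getLast hne] := by
            simp only [PySem.List.enumerate_cons, PySem.List.enumerate_nil, List.map_cons,
              List.map_nil, pvG]
            rw [if_pos]
            constructor
            · rw [hlen_dl]
              have : (j : Int) + ((m - 1 : Nat) : Int) + 1 = ((j + m : Nat) : Int) := by omega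
              rw [this, PySem.Int.mod_eq_zero_iff_dvd]
              exact Int.natCast_dvd_natCast.mpr (Nat.dvd_add h2 dvd_rfl)
            · rw [hlen_dl]
              push_cast [Nat.cast_sub hm]
              omega
          have htl : (j : Int) + (hd.dropLast.length : Int) + (([hd.getLast hne] : List String).length : Int)
              = (j : Int) + (m : Int) := by
            simp [hlen_dl]; omega
          rw [hid, hlast1, htl]
          simp [List.append_assoc]
        rw [hAmap]
        -- now a pure string computation: compare the two joins character-wise
        apply String.toList_inj.mp
        have hTne : (PySem.List.enumerate (ws.drop (j + m)) ((j : Int) + (m : Int))).map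
            (pvG ws.length m) ≠ [] := by
          intro h
          have := congrArg List.length h
          simp only [List.length_map, PySem.List.length_enumerate, List.length_drop,
            List.length_nil] at this
          omega
        have hgl : hd.getLast! = hd.getLast hne := pvGetLast!_eq hd hne
        have hcast : ((j + m : Nat) : Int) = (j : Int) + (m : Int) := by push_cast; ring
        simp only [String.toList_append, PySem.Str.toList_join, List.map_append, List.map_map,
          hcast, hgl]
        rw [List.append_assoc, pvJoinAppend " ".toList _ _ (by simp)
            (by simpa using hTne)]
        have hmaphd : List.map String.toList hd.dropLast ++ [(hd.getLast hne).toList]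
            = List.map String.toList hd := by
          simpa using congrArg (List.map String.toList) hdecomp
        by_cases he : pvEndsPunct (hd.getLast hne) = true
        · rw [if_pos he, if_neg (by simp [he])]
          simp only [List.map_cons, List.map_nil]
          rw [hmaphd]
          simp [List.append_assoc]
        · rw [if_neg he, if_pos (by revert he; cases pvEndsPunct (hd.getLast hne) <;> simp)]
          simp only [List.map_cons, List.map_nil, String.toList_append]
          rw [pvJoinConcatSuffix, hmaphd]
          simp only [List.append_assoc]
          have hsep : (", " : String).toList = ("," : String).toList ++ (" " : String).toList := by
            decide
          rw [hsep, List.append_assoc]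

set_option maxHeartbeats 1000000 in
theorem pvTop : ∀ (text : String) (n : Int), Pre_insert_light_commas_py text n →
    insert_light_commas_py text n = insert_light_commas_py_alt text n := by
  intro text n hpre
  have hn : 0 < n := hpre
  lift n to Nat using hn.le with m hm
  have hm0 : 0 < m := by exact_mod_cast hn
  unfold insert_light_commas_py insert_light_commas_py_alt
  by_cases hle : ((PySem.Str.split₀ (PySem.Str.strip text)).length : Int) ≤ (m : Int)
  · simp only [if_pos hle]
  · simp only [if_neg hle]
    set ws := PySem.Str.split₀ (PySem.Str.strip text) with hws
    rw [pvFoldA ws.length m (PySem.List.enumerate ws) []]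
    simp only [List.nil_append]
    have h0 : PySem.List.enumerate ws = PySem.List.enumerate (ws.drop 0) ((0 : Nat) : Int) := by
      simp
    rw [h0, ← pvMain ws m hm0 (ws.length + 1) 0 (by omega) (Nat.dvd_zero m) (Nat.zero_le _)]
    simp

-- ===== VERDICT (by name: the statement is the Claim_ definition above) =====
theorem insert_light_commas_py_spec : Claim_equal_insert_light_commas_py := by
  intro text n _ hpre
  exact pvTop text n hpre
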